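-- pv_equiv track=rewrite | github.com/matti377/Open-ECG-Digitizer | scripts/analyse.py | lead_order
-- ===== SOURCE A (Python) =====
-- PREFERRED_LEADS = ["II", "I", "V2", "V5", "V6", "III", "V1", "V3", "V4", "aVL", "aVF", "aVR"]
--
-- def lead_order(sig_names):
--     upper = [s.upper() for s in sig_names]
--     order = []
--     for p in PREFERRED_LEADS:
--         pu = p.upper()
--         for i, s in enumerate(upper):
--             if s == pu and i not in order:
--                 order.append(i)
--     for i in range(len(sig_names)):
--         if i not in order:
--             order.append(i)
--     return order
-- ===== SOURCE B (Python) =====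
-- PREFERRED_LEADS = ["II", "I", "V2", "V5", "V6", "III", "V1", "V3", "V4", "aVL", "aVF", "aVR"]
--
-- def lead_order(sig_names):
--     # One pass: bucket each index by the rank of its (uppercased) name, then flatten.
--     rank = {p.upper(): r for r, p in enumerate(PREFERRED_LEADS)}
--     buckets = [[] for _ in range(len(PREFERRED_LEADS) + 1)]
--     for i, s in enumerate(sig_names):
--         buckets[rank.get(s.upper(), len(PREFERRED_LEADS))].append(i)
--     return [i for b in buckets for i in b]
-- ===== Notes on version B (the rewrite author's own statement) =====
-- stated objective: faster
-- what changed: Replaces A's per-preferred-lead rescans of the name list plus linear 'i not in order' membership tests with one rank dictionary, a single bucketing pass over the names, and a flatten.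
import Mathlib
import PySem

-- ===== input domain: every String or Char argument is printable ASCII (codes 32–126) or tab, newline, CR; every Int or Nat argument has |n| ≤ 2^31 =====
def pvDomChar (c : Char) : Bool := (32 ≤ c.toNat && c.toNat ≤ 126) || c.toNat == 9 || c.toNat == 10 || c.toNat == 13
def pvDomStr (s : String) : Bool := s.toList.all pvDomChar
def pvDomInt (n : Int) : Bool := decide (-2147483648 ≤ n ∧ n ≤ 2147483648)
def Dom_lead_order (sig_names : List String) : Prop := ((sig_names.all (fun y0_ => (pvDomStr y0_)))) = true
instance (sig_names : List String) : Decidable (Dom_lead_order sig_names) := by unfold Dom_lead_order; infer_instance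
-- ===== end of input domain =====

-- B replaces A's nested per-preferred-lead rescans (with linear list-membership tests) by a
-- rank table, one bucketing pass over the names and a flatten; the return values agree.

def PREFERRED_LEADS : List String :=
  ["II", "I", "V2", "V5", "V6", "III", "V1", "V3", "V4", "aVL", "aVF", "aVR"]

-- ===== PORT A =====
def lead_order (sig_names : List String) : List Int :=
  let upper := sig_names.map (fun s => PySem.Str.upper s)
  let order := PREFERRED_LEADS.foldl (fun order p =>
      let pu := PySem.Str.upper p
      (PySem.List.enumerate upper).foldl (fun order is =>
        if is.2 = pu ∧ is.1 ∉ order then order ++ [is.1] else order) order)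
    ([] : List Int)
  (PySem.List.pyRange 0 (sig_names.length : Int) 1).foldl
    (fun order i => if i ∉ order then order ++ [i] else order) order

-- ===== PORT B =====
def lead_order_alt (sig_names : List String) : List Int :=
  let rank : PySem.Dict String Int :=
    (PySem.List.enumerate PREFERRED_LEADS).foldl
      (fun d rp => d.insert (PySem.Str.upper rp.2) rp.1) PySem.Dict.empty
  let buckets0 : List (List Int) := List.replicate (PREFERRED_LEADS.length + 1) []
  let buckets := (PySem.List.enumerate sig_names).foldl
    (fun bs is =>
      let r := rank.getD (PySem.Str.upper is.2) (PREFERRED_LEADS.length : Int)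
      PySem.List.pySetD bs r (PySem.List.pyGetD bs r [] ++ [is.1]))
    buckets0
  buckets.foldl (fun out b => out ++ b) []

-- ===== PRECONDITION & SPEC =====
def Spec_lead_order (sig_names : List String) (out : List Int) : Prop := out = lead_order_alt sig_names
instance (sig_names : List String) (out : List Int) : Decidable (Spec_lead_order sig_names out) := by unfold Spec_lead_order; infer_instance

-- ===== CLAIM (what is proved, stated in full; the proofs are below) =====
def Claim_equal_lead_order : Prop := ∀ (sig_names : List String), Dom_lead_order sig_names → Spec_lead_order sig_names (lead_order sig_names)

-- ===== LEMMAS AND PROOFS =====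

-- The rank table B builds, as a literal.
def rankD : PySem.Dict String Int :=
  PySem.Dict.mk [("II",0),("I",1),("V2",2),("V5",3),("V6",4),("III",5),
                 ("V1",6),("V3",7),("V4",8),("AVL",9),("AVF",10),("AVR",11)]

-- B's key of one name: rank of the uppercased name, default 12.
def kf (s : String) : Int := rankD.getD (PySem.Str.upper s) 12

theorem kf_def (s : String) : rankD.getD (PySem.Str.upper s) 12 = kf s := rfl

-- segment r: the indices whose name has rank r, in order.
def seg (xs : List String) (r : Int) : List Int :=
  ((PySem.List.enumerate xs).filter (fun is => decide (kf is.2 = r))).map (·.1)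

set_option maxHeartbeats 2000000 in
theorem rankB_eq : (PySem.List.enumerate PREFERRED_LEADS).foldl
    (fun d rp => d.insert (PySem.Str.upper rp.2) rp.1) PySem.Dict.empty = rankD := by decide

theorem getD_bounds (t : String) : 0 ≤ rankD.getD t 12 ∧ rankD.getD t 12 ≤ 12 := by
  rw [PySem.Dict.getD_eq_get?_getD]
  rcases hg : rankD.get? t with _ | v
  · simp
  · have hm := PySem.Dict.mem_items_of_get?_eq_some _ hg
    simp [rankD] at hm
    obtain ⟨-,rfl⟩|⟨-,rfl⟩|⟨-,rfl⟩|⟨-,rfl⟩|⟨-,rfl⟩|⟨-,rfl⟩|⟨-,rfl⟩|⟨-,rfl⟩|⟨-,rfl⟩|⟨-,rfl⟩|⟨-,rfl⟩|⟨-,rfl⟩ := hm <;> simp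

theorem kf_bounds (s : String) : 0 ≤ kf s ∧ kf s ≤ 12 := getD_bounds (PySem.Str.upper s)

theorem rank_eq_0 (t : String) : rankD.getD t 12 = 0 ↔ t = "II" := by
  constructor
  · intro h
    rw [PySem.Dict.getD_eq_get?_getD] at h
    rcases hg : rankD.get? t with _ | v <;> rw [hg] at h <;> simp at h
    have hm := PySem.Dict.mem_items_of_get?_eq_some _ hg
    subst h
    simp [rankD] at hm
    exact hm
  · rintro rfl; decide

theorem rank_eq_1 (t : String) : rankD.getD t 12 = 1 ↔ t = "I" := by
  constructor
  · intro h
    rw [PySem.Dict.getD_eq_get?_getD] at h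
    rcases hg : rankD.get? t with _ | v <;> rw [hg] at h <;> simp at h
    have hm := PySem.Dict.mem_items_of_get?_eq_some _ hg
    subst h
    simp [rankD] at hm
    exact hm
  · rintro rfl; decide

theorem rank_eq_2 (t : String) : rankD.getD t 12 = 2 ↔ t = "V2" := by
  constructor
  · intro h
    rw [PySem.Dict.getD_eq_get?_getD] at h
    rcases hg : rankD.get? t with _ | v <;> rw [hg] at h <;> simp at h
    have hm := PySem.Dict.mem_items_of_get?_eq_some _ hg
    subst h
    simp [rankD] at hm
    exact hm
  · rintro rfl; decide

theorem rank_eq_3 (t : String) : rankD.getD t 12 = 3 ↔ t = "V5" := by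
  constructor
  · intro h
    rw [PySem.Dict.getD_eq_get?_getD] at h
    rcases hg : rankD.get? t with _ | v <;> rw [hg] at h <;> simp at h
    have hm := PySem.Dict.mem_items_of_get?_eq_some _ hg
    subst h
    simp [rankD] at hm
    exact hm
  · rintro rfl; decide

theorem rank_eq_4 (t : String) : rankD.getD t 12 = 4 ↔ t = "V6" := by
  constructor
  · intro h
    rw [PySem.Dict.getD_eq_get?_getD] at h
    rcases hg : rankD.get? t with _ | v <;> rw [hg] at h <;> simp at h
    have hm := PySem.Dict.mem_items_of_get?_eq_some _ hg
    subst h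
    simp [rankD] at hm
    exact hm
  · rintro rfl; decide

theorem rank_eq_5 (t : String) : rankD.getD t 12 = 5 ↔ t = "III" := by
  constructor
  · intro h
    rw [PySem.Dict.getD_eq_get?_getD] at h
    rcases hg : rankD.get? t with _ | v <;> rw [hg] at h <;> simp at h
    have hm := PySem.Dict.mem_items_of_get?_eq_some _ hg
    subst h
    simp [rankD] at hm
    exact hm
  · rintro rfl; decide

theorem rank_eq_6 (t : String) : rankD.getD t 12 = 6 ↔ t = "V1" := by
  constructor
  · intro h
    rw [PySem.Dict.getD_eq_get?_getD] at h
    rcases hg : rankD.get? t with _ | v <;> rw [hg] at h <;> simp at h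
    have hm := PySem.Dict.mem_items_of_get?_eq_some _ hg
    subst h
    simp [rankD] at hm
    exact hm
  · rintro rfl; decide

theorem rank_eq_7 (t : String) : rankD.getD t 12 = 7 ↔ t = "V3" := by
  constructor
  · intro h
    rw [PySem.Dict.getD_eq_get?_getD] at h
    rcases hg : rankD.get? t with _ | v <;> rw [hg] at h <;> simp at h
    have hm := PySem.Dict.mem_items_of_get?_eq_some _ hg
    subst h
    simp [rankD] at hm
    exact hm
  · rintro rfl; decide

theorem rank_eq_8 (t : String) : rankD.getD t 12 = 8 ↔ t = "V4" := by
  constructor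
  · intro h
    rw [PySem.Dict.getD_eq_get?_getD] at h
    rcases hg : rankD.get? t with _ | v <;> rw [hg] at h <;> simp at h
    have hm := PySem.Dict.mem_items_of_get?_eq_some _ hg
    subst h
    simp [rankD] at hm
    exact hm
  · rintro rfl; decide

theorem rank_eq_9 (t : String) : rankD.getD t 12 = 9 ↔ t = "AVL" := by
  constructor
  · intro h
    rw [PySem.Dict.getD_eq_get?_getD] at h
    rcases hg : rankD.get? t with _ | v <;> rw [hg] at h <;> simp at h
    have hm := PySem.Dict.mem_items_of_get?_eq_some _ hg
    subst h
    simp [rankD] at hm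
    exact hm
  · rintro rfl; decide

theorem rank_eq_10 (t : String) : rankD.getD t 12 = 10 ↔ t = "AVF" := by
  constructor
  · intro h
    rw [PySem.Dict.getD_eq_get?_getD] at h
    rcases hg : rankD.get? t with _ | v <;> rw [hg] at h <;> simp at h
    have hm := PySem.Dict.mem_items_of_get?_eq_some _ hg
    subst h
    simp [rankD] at hm
    exact hm
  · rintro rfl; decide

theorem rank_eq_11 (t : String) : rankD.getD t 12 = 11 ↔ t = "AVR" := by
  constructor
  · intro h
    rw [PySem.Dict.getD_eq_get?_getD] at h
    rcases hg : rankD.get? t with _ | v <;> rw [hg] at h <;> simp at h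
    have hm := PySem.Dict.mem_items_of_get?_eq_some _ hg
    subst h
    simp [rankD] at hm
    exact hm
  · rintro rfl; decide

-- Pairwise-distinct firsts: two members with equal firsts are equal.
theorem eq_of_mem_pairwise_fst {α : Type} {e : List (Int × α)}
    (he : e.Pairwise (fun a b => a.1 ≠ b.1)) {is js : Int × α}
    (h1 : is ∈ e) (h2 : js ∈ e) (h : is.1 = js.1) : is = js := by
  by_contra hne
  exact (he.forall (fun a b h => (h ∘ Eq.symm)) h1 h2 hne) h

-- A's inner loop appends exactly the matching indices.
theorem inner_fold {α : Type} (P : Int × α → Prop) [DecidablePred P] :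
    ∀ (e : List (Int × α)) (acc : List Int),
    e.Pairwise (fun a b => a.1 ≠ b.1) → (∀ is ∈ e, P is → is.1 ∉ acc) →
    e.foldl (fun acc is => if P is ∧ is.1 ∉ acc then acc ++ [is.1] else acc) acc
      = acc ++ (e.filter (fun is => decide (P is))).map (·.1) := by
  intro e
  induction e with
  | nil => intro acc _ _; simp
  | cons is e ih =>
    intro acc hp hacc
    by_cases hP : P is
    · have hnot : is.1 ∉ acc := hacc is (by simp) hP
      rw [List.foldl_cons, if_pos ⟨hP, hnot⟩]
      rw [ih (acc ++ [is.1]) hp.of_cons ?_]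
      · simp [hP]
      · intro js hjs hPj
        simp only [List.mem_append, List.mem_singleton]
        rintro (h | h)
        · exact hacc js (by simp [hjs]) hPj h
        · exact (List.pairwise_cons.mp hp).1 js hjs h.symm
    · rw [List.foldl_cons, if_neg (fun h => hP h.1)]
      rw [ih acc hp.of_cons (fun js hjs hPj => hacc js (by simp [hjs]) hPj)]
      simp [hP]

-- A's outer loop over the preferred leads.
theorem outer_fold (e : List (Int × String)) (he : e.Pairwise (fun a b => a.1 ≠ b.1)) :
    ∀ (ps : List String) (acc : List Int),
    ps.Pairwise (fun p q => PySem.Str.upper p ≠ PySem.Str.upper q) →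
    (∀ p ∈ ps, ∀ is ∈ e, is.2 = PySem.Str.upper p → is.1 ∉ acc) →
    ps.foldl (fun acc p =>
        e.foldl (fun acc is => if is.2 = PySem.Str.upper p ∧ is.1 ∉ acc then acc ++ [is.1] else acc) acc) acc
      = acc ++ ps.flatMap (fun p => (e.filter (fun is => decide (is.2 = PySem.Str.upper p))).map (·.1)) := by
  intro ps
  induction ps with
  | nil => intro acc _ _; simp
  | cons p ps ih =>
    intro acc hps hacc
    rw [List.foldl_cons]
    rw [inner_fold (fun is => is.2 = PySem.Str.upper p) e acc he
        (fun is his hP => hacc p (by simp) is his hP)]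
    rw [ih _ hps.of_cons ?_]
    · simp
    · intro q hq is his hisq
      simp only [List.mem_append]
      rintro (h | h)
      · exact hacc q (by simp [hq]) is his hisq h
      · obtain ⟨js, hjs, hjfst⟩ := List.mem_map.mp h
        have hjs' := List.mem_filter.mp hjs
        have : js = is := eq_of_mem_pairwise_fst he hjs'.1 his hjfst
        subst this
        have : PySem.Str.upper p = PySem.Str.upper q := by
          rw [← of_decide_eq_true hjs'.2, hisq]
        exact (List.pairwise_cons.mp hps).1 q hq this

-- A's final dedup loop.
theorem final_fold :
    ∀ (l : List Int) (acc : List Int), l.Pairwise (· ≠ ·) →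
    l.foldl (fun acc i => if i ∉ acc then acc ++ [i] else acc) acc
      = acc ++ l.filter (fun i => decide (i ∉ acc)) := by
  intro l
  induction l with
  | nil => intro acc _; simp
  | cons i l ih =>
    intro acc hp
    by_cases hmem : i ∈ acc
    · rw [List.foldl_cons, if_neg (by simp [hmem]), ih acc hp.of_cons]
      simp [hmem]
    · rw [List.foldl_cons, if_pos hmem, ih _ hp.of_cons]
      rw [List.filter_cons]
      simp only [hmem, decide_not, not_false_eq_true, decide_true, if_pos]
      rw [List.append_assoc, List.singleton_append]
      congr 2
      apply List.filter_congr
      intro j hj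
      have hne : i ≠ j := (List.pairwise_cons.mp hp).1 j hj
      simp [List.mem_append, hne.symm]

-- enumerate of a mapped list
theorem enumerate_map {α β : Type} (f : α → β) :
    ∀ (xs : List α) (s : Int),
    PySem.List.enumerate (xs.map f) s = (PySem.List.enumerate xs s).map (fun p => (p.1, f p.2)) := by
  intro xs
  induction xs with
  | nil => intro s; simp [PySem.List.enumerate_nil]
  | cons x xs ih => intro s; simp [PySem.List.enumerate_cons, ih]

theorem enumerate_pairwise_ne {α : Type} (xs : List α) (s : Int) :
    (PySem.List.enumerate xs s).Pairwise (fun a b => a.1 ≠ b.1) :=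
  (PySem.List.pairwise_lt_enumerate xs s).imp (fun h => ne_of_lt h)

-- one matching segment of A equals one bucket of B
theorem seg_eq (xs : List String) (r : Int) (pu : String)
    (hpt : ∀ t, rankD.getD t 12 = r ↔ t = pu) :
    ((PySem.List.enumerate (xs.map (fun s => PySem.Str.upper s))).filter
        (fun is => decide (is.2 = pu))).map (·.1) = seg xs r := by
  unfold seg
  rw [enumerate_map]
  rw [List.filter_map, List.map_map]
  congr 1
  apply List.filter_congr
  intro is _
  simp only [Function.comp_apply]
  have h := hpt (PySem.Str.upper is.2)
  simp only [kf_def] at h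
  by_cases hc : PySem.Str.upper is.2 = pu <;> simp_all

-- B's bucketing pass
theorem bucket_fold :
    ∀ (e : List (Int × String)) (bs : List (List Int)), bs.length = 13 →
    e.foldl (fun bs is =>
        PySem.List.pySetD bs (kf is.2) (PySem.List.pyGetD bs (kf is.2) [] ++ [is.1])) bs
      = (List.range 13).map (fun r =>
          bs.getD r [] ++ ((e.filter (fun is => decide (kf is.2 = (r : Int)))).map (·.1))) := by
  intro e
  induction e with
  | nil =>
    intro bs hlen
    simp only [List.foldl_nil, List.filter_nil, List.map_nil, List.append_nil]
    apply List.ext_getElem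
    · simp [hlen]
    · intro n h1 h2
      simp at h2
      simp [List.getD_eq_getElem?_getD, List.getElem?_eq_getElem (by omega : n < bs.length)]
  | cons is e ih =>
    intro bs hlen
    have hb := kf_bounds is.2
    have hcast : kf is.2 = (((kf is.2).toNat : Nat) : Int) := by omega
    have hlt : (kf is.2).toNat < 13 := by omega
    rw [List.foldl_cons]
    have hget : PySem.List.pyGetD bs (kf is.2) [] = bs.getD (kf is.2).toNat [] := by
      rw [hcast, PySem.List.pyGetD_natCast]
      have hmm : ((((kf is.2).toNat : Nat) : Int)).toNat = (kf is.2).toNat := by omega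
      rw [hmm]
    have hset : PySem.List.pySetD bs (kf is.2) (PySem.List.pyGetD bs (kf is.2) [] ++ [is.1])
        = bs.set (kf is.2).toNat (bs.getD (kf is.2).toNat [] ++ [is.1]) := by
      rw [PySem.List.pySetD_of_nonneg (h := hb.1), hget]
    rw [hset, ih _ (by simp [hlen])]
    apply List.ext_getElem
    · simp
    · intro n h1 h2
      simp only [List.length_map, List.length_range] at h1
      simp only [List.getElem_map, List.getElem_range]
      rw [List.filter_cons]
      by_cases hn : (n : Int) = kf is.2
      · have hn' : n = (kf is.2).toNat := by omega
        simp only [← hn, decide_true, if_pos, List.map_cons]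
        rw [List.getD_eq_getElem?_getD, hn']
        simp only [Int.toNat_natCast]
        rw [List.getElem?_set_self (by omega), Option.getD_some,
            List.getD_eq_getElem?_getD,
            List.getElem?_eq_getElem (by omega : (kf is.2).toNat < bs.length)]
        simp [List.append_assoc]
      · have hne : (kf is.2).toNat ≠ n := by omega
        have hcond : (decide (kf is.2 = (n : Int))) = false := by
          simp; omega
        simp only [hcond, Bool.false_eq_true, if_false]
        rw [List.getD_eq_getElem?_getD, List.getElem?_set_ne hne,
            ← List.getD_eq_getElem?_getD]

-- flatten as a fold
theorem flatten_fold (l : List (List Int)) (acc : List Int) :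
    l.foldl (fun out b => out ++ b) acc = acc ++ l.flatten := by
  induction l generalizing acc with
  | nil => simp
  | cons b l ih => simp [ih, List.append_assoc]

-- B computes the 13 segments in rank order
theorem alt_eq_segs (xs : List String) :
    lead_order_alt xs = (List.range 13).flatMap (fun r : Nat => seg xs (r : Int)) := by
  have h12 : (PREFERRED_LEADS.length : Int) = 12 := by decide
  have h13 : PREFERRED_LEADS.length + 1 = 13 := by decide
  simp only [lead_order_alt, rankB_eq, h12, h13, kf_def]
  rw [bucket_fold _ _ (by simp), flatten_fold]
  simp only [List.nil_append, List.flatten_eq_flatMap, List.flatMap_map]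
  congr 1
  funext r
  have hrep : (List.replicate 13 ([] : List Int)).getD r [] = [] := by
    rw [List.getD_eq_getElem?_getD, List.getElem?_replicate]
    split <;> rfl
  rw [hrep, List.nil_append]
  rfl

-- A's matched part equals the first twelve segments
theorem O_eq (xs : List String) :
    PREFERRED_LEADS.flatMap (fun p =>
      ((PySem.List.enumerate (xs.map (fun s => PySem.Str.upper s))).filter
          (fun is => decide (is.2 = PySem.Str.upper p))).map (·.1))
    = (List.range 12).flatMap (fun r : Nat => seg xs (r : Int)) := by
  have e0 : PySem.Str.upper "II" = "II" := by decide
  have e1 : PySem.Str.upper "I" = "I" := by decide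
  have e2 : PySem.Str.upper "V2" = "V2" := by decide
  have e3 : PySem.Str.upper "V5" = "V5" := by decide
  have e4 : PySem.Str.upper "V6" = "V6" := by decide
  have e5 : PySem.Str.upper "III" = "III" := by decide
  have e6 : PySem.Str.upper "V1" = "V1" := by decide
  have e7 : PySem.Str.upper "V3" = "V3" := by decide
  have e8 : PySem.Str.upper "V4" = "V4" := by decide
  have e9 : PySem.Str.upper "aVL" = "AVL" := by decide
  have e10 : PySem.Str.upper "aVF" = "AVF" := by decide
  have e11 : PySem.Str.upper "aVR" = "AVR" := by decide
  have hr : List.range 12 = [0,1,2,3,4,5,6,7,8,9,10,11] := by decide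
  simp only [PREFERRED_LEADS, hr, List.flatMap_cons, List.flatMap_nil, List.append_nil,
    e0, e1, e2, e3, e4, e5, e6, e7, e8, e9, e10, e11]
  rw [seg_eq xs 0 "II" rank_eq_0, seg_eq xs 1 "I" rank_eq_1, seg_eq xs 2 "V2" rank_eq_2,
      seg_eq xs 3 "V5" rank_eq_3, seg_eq xs 4 "V6" rank_eq_4, seg_eq xs 5 "III" rank_eq_5,
      seg_eq xs 6 "V1" rank_eq_6, seg_eq xs 7 "V3" rank_eq_7, seg_eq xs 8 "V4" rank_eq_8,
      seg_eq xs 9 "AVL" rank_eq_9, seg_eq xs 10 "AVF" rank_eq_10, seg_eq xs 11 "AVR" rank_eq_11]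
  norm_num

-- membership in the matched part
theorem mem_O_iff (xs : List String) (is : Int × String)
    (his : is ∈ PySem.List.enumerate xs) :
    (is.1 ∈ (List.range 12).flatMap (fun r : Nat => seg xs (r : Int))) ↔ kf is.2 ≠ 12 := by
  constructor
  · intro h
    obtain ⟨r, hr, hseg⟩ := List.mem_flatMap.mp h
    obtain ⟨js, hjs, hj1⟩ := List.mem_map.mp hseg
    have hjf := List.mem_filter.mp hjs
    have : js = is := eq_of_mem_pairwise_fst (enumerate_pairwise_ne xs 0) hjf.1 his hj1
    subst this
    have := of_decide_eq_true hjf.2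
    have hr12 : r < 12 := List.mem_range.mp hr
    omega
  · intro h
    have hb := kf_bounds is.2
    apply List.mem_flatMap.mpr
    refine ⟨(kf is.2).toNat, List.mem_range.mpr (by omega), ?_⟩
    apply List.mem_map.mpr
    refine ⟨is, List.mem_filter.mpr ⟨his, ?_⟩, rfl⟩
    simp
    omega

-- A computes the same segments
theorem a_eq_segs (xs : List String) :
    lead_order xs = (List.range 13).flatMap (fun r : Nat => seg xs (r : Int)) := by
  have hO := outer_fold (PySem.List.enumerate (xs.map (fun s => PySem.Str.upper s)))
    (enumerate_pairwise_ne _ 0) PREFERRED_LEADS []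
    (by decide)
    (by intro p _ is _ _; simp)
  simp only [lead_order]
  rw [hO, List.nil_append, O_eq]
  rw [final_fold _ _ ((PySem.List.pairwise_lt_pyRange_one 0 _).imp (fun h => ne_of_lt h))]
  have hrange : PySem.List.pyRange 0 (xs.length : Int) 1
      = (PySem.List.enumerate xs).map (·.1) := by
    rw [PySem.List.map_fst_enumerate, zero_add]
  rw [hrange, List.filter_map]
  have hfc : (PySem.List.enumerate xs).filter
        ((fun i => decide (i ∉ (List.range 12).flatMap (fun r : Nat => seg xs (r : Int)))) ∘ (·.1))
      = (PySem.List.enumerate xs).filter (fun is => decide (kf is.2 = 12)) := by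
    apply List.filter_congr
    intro is his
    simp only [Function.comp_apply, decide_eq_decide]
    rw [mem_O_iff xs is his]
    have hb := kf_bounds is.2
    constructor
    · intro h; omega
    · intro h; omega
  rw [hfc]
  have : List.range 13 = List.range 12 ++ [12] := by decide
  rw [this, List.flatMap_append]
  congr 1
  simp [seg]

-- ===== VERDICT (by name: the statement is the Claim_ definition above) =====
theorem lead_order_spec : Claim_equal_lead_order := by
  intro xs _
  unfold Spec_lead_order
  rw [a_eq_segs, alt_eq_segs]
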